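-- pv_equiv track=rewrite | github.com/alpha-beta-soup/national-crash-statistics | source/generalFunctions.py | streetExpander
-- ===== SOURCE A (Python) =====
-- def streetExpander(road,streetdecoder):
--     '''Input: 'St John St' (for example)
--     Output: St John Street'''
--     # First, check St isn't the first element in a street name
--     check = road.replace('near ','').replace('at ','')
--     if check.split(' ')[0] == 'St' and 'St' not in check.split(' ')[1:]:
--         # Then don't repalce the St as it means Saint and there is not Street in title
--         return road
--     # Otherwise, there are two instances of "St" and we want to only replace the second one
--     road = road.split(' ')
--     processed = []
--     road.reverse() # Flip order
--     for i, elem in enumerate(road):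
--         # Do it in reverse so only the last instance of a road shortning trope
--         # gets expanded. This prevents "St John St" becoming "Street John
--         # Street" rather than "St John Street"
--         if (elem in streetdecoder.keys()) and (elem not in processed):
--             processed.append(elem)
--             road[i] = streetdecoder[elem]
--     road.reverse() # Back to original order
--     return ' '.join(road)
-- ===== SOURCE B (Python) =====
-- def streetExpander(road, streetdecoder):
--     '''Input: 'St John St' (for example)
--     Output: St John Street'''
--     # Guard: a leading 'St' with no other 'St' means Saint, not Street
--     parts = road.replace('near ', '').replace('at ', '').split(' ')
--     if parts[0] == 'St' and all(w != 'St' for w in parts[1:]):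
--         return road
--     # Count every word once, then walk forward decrementing: a word whose
--     # remaining count hits 0 is at its last occurrence, which is the only
--     # place A expands it.  One counting pass + one forward pass, no reversal.
--     words = road.split(' ')
--     remaining = {}
--     for w in words:
--         remaining[w] = remaining.get(w, 0) + 1
--     out = []
--     for w in words:
--         remaining[w] -= 1
--         if w in streetdecoder and remaining[w] == 0:
--             out.append(streetdecoder[w])
--         else:
--             out.append(w)
--     return ' '.join(out)
-- ===== Notes on version B (the rewrite author's own statement) =====
-- stated objective: alternative
-- what changed: A reverses the word list, walks it with a 'processed' seen-list while mutating in place, and reverses back; B instead makes a counting pass over the words and then one forward pass that decrements the count and expands a word exactly when its remaining count reaches 0 (its last occurrence) -- no reversal, no seen-list.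
import Mathlib
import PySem

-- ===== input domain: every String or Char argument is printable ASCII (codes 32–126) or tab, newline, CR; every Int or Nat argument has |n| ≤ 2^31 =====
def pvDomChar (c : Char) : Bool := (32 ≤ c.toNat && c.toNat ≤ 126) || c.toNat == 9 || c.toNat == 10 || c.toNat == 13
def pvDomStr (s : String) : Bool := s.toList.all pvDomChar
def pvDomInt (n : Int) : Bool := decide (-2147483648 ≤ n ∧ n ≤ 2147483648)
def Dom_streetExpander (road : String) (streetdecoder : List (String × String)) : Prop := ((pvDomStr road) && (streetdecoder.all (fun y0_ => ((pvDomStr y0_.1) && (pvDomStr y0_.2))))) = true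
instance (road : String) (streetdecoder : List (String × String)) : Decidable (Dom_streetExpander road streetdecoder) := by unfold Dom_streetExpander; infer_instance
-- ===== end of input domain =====

-- B replaces A's reverse / seen-list / reverse-back loop by a counting pass plus one
-- forward pass that expands a word when its remaining count hits 0 (its last
-- occurrence) — no reversal, no seen-list (objective: alternative).

-- ===== PORT A =====
def streetExpander (road : String) (streetdecoder : List (String × String)) : String :=
  let check := PySem.Str.replace (PySem.Str.replace road "near " "") "at " ""
  let parts := (PySem.Str.split? check " ").getD []
  if PySem.List.pyGetD parts 0 "" == "St" && !((PySem.List.slice parts (some 1) none).contains "St") then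
    road
  else
    let d := PySem.Dict.mk streetdecoder
    let rev := ((PySem.Str.split? road " ").getD []).reverse
    -- in-place update road[i] at the current position, with the 'processed' seen-list
    let res := rev.foldl (fun (acc : List String × List String) elem =>
        if d.contains elem && !(acc.2.contains elem) then
          (acc.1 ++ [d.getD elem ""], acc.2 ++ [elem])
        else
          (acc.1 ++ [elem], acc.2)) ([], [])
    PySem.Str.join " " res.1.reverse

-- ===== PORT B =====
def streetExpander_alt (road : String) (streetdecoder : List (String × String)) : String :=
  let parts := (PySem.Str.split? (PySem.Str.replace (PySem.Str.replace road "near " "") "at " "") " ").getD []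
  -- parts[0]: split? with a non-empty separator always yields a non-empty list, so headD is exact
  if parts.headD "" == "St" && parts.tail.all (fun w => w != "St") then
    road
  else
    let d := PySem.Dict.mk streetdecoder
    let words := (PySem.Str.split? road " ").getD []
    let remaining := words.foldl (fun (r : PySem.Dict String Int) w => r.insert w (r.getD w 0 + 1)) PySem.Dict.empty
    let res := words.foldl (fun (acc : PySem.Dict String Int × List String) w =>
        let r := acc.1.insert w (acc.1.getD w 0 - 1)
        if d.contains w && r.getD w 0 == 0 then (r, acc.2 ++ [d.getD w ""])
        else (r, acc.2 ++ [w])) (remaining, [])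
    PySem.Str.join " " res.2

-- ===== PRECONDITION & SPEC =====
def Spec_streetExpander (road : String) (streetdecoder : List (String × String)) (out : String) : Prop := out = streetExpander_alt road streetdecoder
instance (road : String) (streetdecoder : List (String × String)) (out : String) : Decidable (Spec_streetExpander road streetdecoder out) := by unfold Spec_streetExpander; infer_instance

-- ===== CLAIM (what is proved, stated in full; the proofs are below) =====
def Claim_equal_streetExpander : Prop := ∀ (road : String) (streetdecoder : List (String × String)), Dom_streetExpander road streetdecoder → Spec_streetExpander road streetdecoder (streetExpander road streetdecoder)

-- ===== LEMMAS AND PROOFS =====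

-- the two guard formulations agree
theorem guard_eq (parts : List String) :
    (PySem.List.pyGetD parts 0 "" == "St" && !((PySem.List.slice parts (some 1) none).contains "St"))
    = (parts.headD "" == "St" && parts.tail.all (fun w => w != "St")) := by
  rw [PySem.List.slice_from_one]
  cases parts with
  | nil => rfl
  | cons p ps =>
    simp only [PySem.List.pyGetD, PySem.List.pyGet?, PySem.List.pyIdx?, List.headD, List.tail]
    norm_num
    congr 1
    by_cases h : "St" ∈ ps
    · simp [h]
    · simp [h]
      exact fun x hx he => h (he ▸ hx)

-- both loops compute: expand w exactly at its last occurrence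
def bLast (K : String → Bool) (dec : String → String) : List String → List String
  | [] => []
  | w :: ws => (if K w && !(ws.contains w) then dec w else w) :: bLast K dec ws

-- A's loop, as a pure recursion over the reversed word list with the seen-list 'proc'
def gLoop (K : String → Bool) (dec : String → String) : List String → List String → List String
  | _, [] => []
  | proc, w :: ws =>
    if K w && !(proc.contains w) then dec w :: gLoop K dec (proc ++ [w]) ws
    else w :: gLoop K dec proc ws

-- bLast, generalized with A's seen-list
def bmapS (K : String → Bool) (dec : String → String) : List String → List String → List String
  | _, [] => []
  | proc, w :: ws =>
    (if K w && !(proc.contains w) && !(ws.contains w) then dec w else w) :: bmapS K dec proc ws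

theorem foldl_eq_gLoop (K : String → Bool) (dec : String → String)
    (xs : List String) (out proc : List String) :
    (xs.foldl (fun (acc : List String × List String) elem =>
        if K elem && !(acc.2.contains elem) then
          (acc.1 ++ [dec elem], acc.2 ++ [elem])
        else
          (acc.1 ++ [elem], acc.2)) (out, proc)).1 = out ++ gLoop K dec proc xs := by
  induction xs generalizing out proc with
  | nil => simp [gLoop]
  | cons w ws ih =>
    rw [List.foldl_cons, gLoop]
    by_cases h : (K w && !(proc.contains w)) = true
    · rw [if_pos h, if_pos h, ih]; simp
    · rw [if_neg h, if_neg h, ih]; simp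

theorem bmapS_append_singleton (K : String → Bool) (dec : String → String)
    (ws : List String) (proc : List String) (w : String) :
    bmapS K dec proc (ws ++ [w]) =
      bmapS K dec (if K w && !(proc.contains w) then proc ++ [w] else proc) ws ++
      [if K w && !(proc.contains w) then dec w else w] := by
  induction ws generalizing proc with
  | nil => by_cases h : (K w && !(proc.contains w)) = true <;> simp [bmapS]
  | cons v vs ih =>
    simp only [List.cons_append, bmapS, ih]
    by_cases hc : (K w && !(proc.contains w)) = true
    · rw [if_pos hc, if_pos hc]
      congr 1
      by_cases hK : K v = true <;> by_cases hp : v ∈ proc <;> by_cases hvs : v ∈ vs <;>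
        by_cases hvw : v = w <;> simp_all [List.mem_append]
    · rw [if_neg hc, if_neg hc]
      congr 1
      by_cases hK : K v = true <;> by_cases hp : v ∈ proc <;> by_cases hvs : v ∈ vs <;>
        by_cases hvw : v = w <;> simp_all [List.mem_append]

theorem gLoop_reverse_eq_bmapS (K : String → Bool) (dec : String → String)
    (ws : List String) : ∀ proc, (gLoop K dec proc ws.reverse).reverse = bmapS K dec proc ws := by
  induction ws using List.reverseRecOn with
  | nil => intro proc; simp [gLoop, bmapS]
  | append_singleton ws' w ih =>
    intro proc
    rw [List.reverse_append, List.reverse_singleton, List.singleton_append, gLoop,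
        bmapS_append_singleton]
    by_cases h : (K w && !(proc.contains w)) = true
    · rw [if_pos h, if_pos h, if_pos h, List.reverse_cons, ih]
    · rw [if_neg h, if_neg h, if_neg h, List.reverse_cons, ih]

theorem bmapS_nil_eq_bLast (K : String → Bool) (dec : String → String) (ws : List String) :
    bmapS K dec [] ws = bLast K dec ws := by
  induction ws with
  | nil => rfl
  | cons w ws ih => simp [bmapS, bLast, ih]

-- B's second pass: under the count invariant it produces bLast
theorem foldl_count_eq_bLast (K : String → Bool) (dec : String → String)
    (ws : List String) : ∀ (c : PySem.Dict String Int) (out : List String),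
    (∀ v, c.getD v 0 = (ws.count v : Int)) →
    (ws.foldl (fun (acc : PySem.Dict String Int × List String) w =>
        let r := acc.1.insert w (acc.1.getD w 0 - 1)
        if K w && r.getD w 0 == 0 then (r, acc.2 ++ [dec w])
        else (r, acc.2 ++ [w])) (c, out)).2 = out ++ bLast K dec ws := by
  induction ws with
  | nil => intro c out _; simp [bLast]
  | cons w ws ih =>
    intro c out h
    have hw : (c.insert w (c.getD w 0 - 1)).getD w 0 = (ws.count w : Int) := by
      rw [PySem.Dict.getD_insert_self, h w, List.count_cons_self]
      push_cast; ring
    have hb : ((c.insert w (c.getD w 0 - 1)).getD w 0 == 0) = !(ws.contains w) := by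
      rw [hw]
      by_cases hm : w ∈ ws <;> simp [hm, List.count_eq_zero]
    have hinv : ∀ v, (c.insert w (c.getD w 0 - 1)).getD v 0 = (ws.count v : Int) := by
      intro v
      by_cases hv : w = v
      · subst hv; exact hw
      · rw [show (c.insert w (c.getD w 0 - 1)).getD v 0 = c.getD v 0 by
              simp [PySem.Dict.getD, PySem.Dict.get?_insert_of_ne c _ (Ne.symm hv)],
            h v]
        simp [List.count_cons]
        exact hv
    have hcond : (let r := (c, out).1.insert w ((c, out).1.getD w 0 - 1)
        if K w && r.getD w 0 == 0 then (r, (c, out).2 ++ [dec w])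
        else (r, (c, out).2 ++ [w]))
        = (c.insert w (c.getD w 0 - 1), out ++ [if K w && !(ws.contains w) then dec w else w]) := by
      show (if K w && ((c.insert w (c.getD w 0 - 1)).getD w 0 == 0) then
              (c.insert w (c.getD w 0 - 1), out ++ [dec w])
            else (c.insert w (c.getD w 0 - 1), out ++ [w]))
          = _
      rw [hb]
      by_cases hk : (K w && !(ws.contains w)) = true
      · rw [if_pos hk, if_pos hk]
      · rw [if_neg hk, if_neg hk]
    rw [List.foldl_cons, hcond, ih _ _ hinv, bLast]
    simp

-- ===== VERDICT (by name: the statement is the Claim_ definition above) =====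
theorem streetExpander_spec : Claim_equal_streetExpander := by
  intro road sd _
  simp only [Spec_streetExpander, streetExpander, streetExpander_alt]
  rw [guard_eq]
  by_cases hguard : ((((PySem.Str.split? (PySem.Str.replace (PySem.Str.replace road "near " "") "at " "") " ").getD []).headD "" == "St") && (((PySem.Str.split? (PySem.Str.replace (PySem.Str.replace road "near " "") "at " "") " ").getD []).tail.all (fun w => w != "St"))) = true
  · rw [if_pos hguard, if_pos hguard]
  · rw [if_neg hguard, if_neg hguard]
    congr 1
    have h1 := foldl_eq_gLoop (fun e => PySem.Dict.contains (PySem.Dict.mk sd) e)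
      (fun e => PySem.Dict.getD (PySem.Dict.mk sd) e "")
      (((PySem.Str.split? road " ").getD []).reverse) [] []
    rw [h1, List.nil_append,
        gLoop_reverse_eq_bmapS (fun e => PySem.Dict.contains (PySem.Dict.mk sd) e)
          (fun e => PySem.Dict.getD (PySem.Dict.mk sd) e "") ((PySem.Str.split? road " ").getD []),
        bmapS_nil_eq_bLast]
    have h2 := foldl_count_eq_bLast (fun e => PySem.Dict.contains (PySem.Dict.mk sd) e)
      (fun e => PySem.Dict.getD (PySem.Dict.mk sd) e "")
      ((PySem.Str.split? road " ").getD [])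
      (((PySem.Str.split? road " ").getD []).foldl (fun (r : PySem.Dict String Int) w => r.insert w (r.getD w 0 + 1)) PySem.Dict.empty)
      [] (by
        intro v
        rw [PySem.Dict.foldl_insert_getD_add_one_eq_counter, PySem.Dict.getD_counter])
    rw [h2, List.nil_append]
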